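-- pv_equiv track=rewrite | github.com/FadimeYaren/multi-robot-collaboration-using-deep-learning-RoboticsSpring2025ABU | 06/09kitchen.py | combine_plate_contents
-- ===== SOURCE A (Python) =====
-- def combine_plate_contents(contents):
--     types = sorted(item["type"] for item in contents)
--     if all(x in types for x in ["bread_whole", "tomato_chopped", "lettuce_chopped", "meat_cooked"]):
--         return "plate_burger"
--     elif types == ["bread_whole", "lettuce_chopped", "meat_cooked"]:
--         return "plate_bread_lettuce_meat"
--     elif types == ["bread_whole", "tomato_chopped", "lettuce_chopped"]:
--         return "plate_bread_tomato_lettuce"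
--     elif types == ["bread_whole", "tomato_chopped", "meat_cooked"]:
--         return "plate_bread_tomato_meat"
--     elif types == ["tomato_chopped", "lettuce_chopped", "meat_cooked"]:
--         return "plate_tomato_lettuce_meat"
--     elif types == ["bread_whole", "tomato_chopped"]:
--         return "plate_bread_tomato"
--     elif types == ["bread_whole", "lettuce_chopped"]:
--         return "plate_bread_lettuce"
--     elif types == ["bread_whole", "meat_cooked"]:
--         return "plate_bread_meat"
--     elif types == ["tomato_chopped", "lettuce_chopped"]:
--         return "plate_tomato_lettuce"
--     elif types == ["tomato_chopped", "meat_cooked"]: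
--         return "plate_tomato_meat"
--     elif types == ["lettuce_chopped", "meat_cooked"]:
--         return "plate_lettuce_meat"
--     elif types == ["bread_whole"]:
--         return "plate_bread"
--     elif types == ["tomato_chopped"]:
--         return "plate_tomato"
--     elif types == ["lettuce_chopped"]:
--         return "plate_lettuce"
--     elif types == ["meat_cooked"]:
--         return "plate_meat"
--     else:
--         return "plate_clean"
-- ===== SOURCE B (Python) =====
-- CANON = [("bread_whole", "bread"), ("tomato_chopped", "tomato"),
--          ("lettuce_chopped", "lettuce"), ("meat_cooked", "meat")]
--
-- def combine_plate_contents(contents):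
--     types = [item["type"] for item in contents]
--     present = set(types)
--     if all(full in present for full, _ in CANON):
--         return "plate_burger"
--     known = [full for full, _ in CANON]
--     if not types or len(types) != len(present) or any(t not in known for t in present):
--         return "plate_clean"
--     return "plate_" + "_".join(short for full, short in CANON if full in present)
-- ===== Notes on version B (the rewrite author's own statement) =====
-- stated objective: simpler
-- what changed: B replaces A's 16-branch chain of hand-written sorted-list comparisons by one subset test for the burger, one validity test (non-empty, no duplicates, no unknown type), and a join of short ingredient names in a fixed canonical order.
-- intended difference: On plates whose item types are distinct known ingredients including tomato_chopped together with lettuce_chopped or meat_cooked but not a full burger (the five sets {t,l},{t,m},{b,t,l},{b,t,m},{t,l,m}), A returns 'plate_clean' because its comparison literals list tomato before lettuce/meat and hence are not in sorted order (dead branches); B returns the intended combination name (e.g. 'plate_tomato_lettuce'), which is clearly what the branch was written for. — e.g. on combine_plate_contents([[("type", "tomato_chopped")], [("type", "lettuce_chopped")]]): A returns "plate_clean", B returns "plate_tomato_lettuce"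
import Mathlib
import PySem

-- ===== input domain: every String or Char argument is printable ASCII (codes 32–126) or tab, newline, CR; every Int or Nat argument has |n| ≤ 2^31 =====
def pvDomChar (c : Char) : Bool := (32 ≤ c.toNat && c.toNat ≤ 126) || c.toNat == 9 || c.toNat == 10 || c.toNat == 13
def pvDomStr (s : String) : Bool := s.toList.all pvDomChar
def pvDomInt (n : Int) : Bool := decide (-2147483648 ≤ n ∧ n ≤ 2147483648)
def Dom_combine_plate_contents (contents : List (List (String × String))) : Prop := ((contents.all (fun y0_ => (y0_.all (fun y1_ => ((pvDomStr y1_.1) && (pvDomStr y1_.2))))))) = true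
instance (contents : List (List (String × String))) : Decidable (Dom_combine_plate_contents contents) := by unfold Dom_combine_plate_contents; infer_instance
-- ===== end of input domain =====

-- B replaces A's 16-branch chain of sorted-list comparisons by one subset test, one validity test
-- and a canonical-order name join; five of A's comparison literals are not in sorted order (dead
-- branches), so A returns "plate_clean" there while B returns the intended name (see D_ below).

-- ===== PORT A =====
-- item["type"]: getD's default "" is never used under Pre_ (every item carries the key "type").
def pvTypeOf (item : List (String × String)) : String :=
  PySem.Dict.getD (PySem.Dict.mk item) "type" ""

def combine_plate_contents (contents : List (List (String × String))) : String :=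
  let types := PySem.List.sorted (contents.map pvTypeOf) (fun x => x) false
  if ["bread_whole", "tomato_chopped", "lettuce_chopped", "meat_cooked"].all
      (fun x => types.contains x) then "plate_burger"
  else if types = ["bread_whole", "lettuce_chopped", "meat_cooked"] then "plate_bread_lettuce_meat"
  else if types = ["bread_whole", "tomato_chopped", "lettuce_chopped"] then "plate_bread_tomato_lettuce"
  else if types = ["bread_whole", "tomato_chopped", "meat_cooked"] then "plate_bread_tomato_meat"
  else if types = ["tomato_chopped", "lettuce_chopped", "meat_cooked"] then "plate_tomato_lettuce_meat"
  else if types = ["bread_whole", "tomato_chopped"] then "plate_bread_tomato"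
  else if types = ["bread_whole", "lettuce_chopped"] then "plate_bread_lettuce"
  else if types = ["bread_whole", "meat_cooked"] then "plate_bread_meat"
  else if types = ["tomato_chopped", "lettuce_chopped"] then "plate_tomato_lettuce"
  else if types = ["tomato_chopped", "meat_cooked"] then "plate_tomato_meat"
  else if types = ["lettuce_chopped", "meat_cooked"] then "plate_lettuce_meat"
  else if types = ["bread_whole"] then "plate_bread"
  else if types = ["tomato_chopped"] then "plate_tomato"
  else if types = ["lettuce_chopped"] then "plate_lettuce"
  else if types = ["meat_cooked"] then "plate_meat"
  else "plate_clean"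

-- ===== PORT B =====
def pvCANON : List (String × String) :=
  [("bread_whole", "bread"), ("tomato_chopped", "tomato"),
   ("lettuce_chopped", "lettuce"), ("meat_cooked", "meat")]

def pvBBody (types : List String) : String :=
  let present := PySem.Set.ofList types
  if pvCANON.all (fun p => PySem.Set.contains present p.1) then "plate_burger"
  else if types = [] ∨ (types.length : Int) ≠ PySem.Set.len present
      ∨ present.any (fun t => !((pvCANON.map Prod.fst).contains t)) then "plate_clean"
  else PySem.Str.join "_"
    ("plate" :: (pvCANON.filter (fun p => PySem.Set.contains present p.1)).map Prod.snd)

def combine_plate_contents_alt (contents : List (List (String × String))) : String :=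
  pvBBody (contents.map pvTypeOf)

-- ===== PRECONDITION & SPEC =====
-- Pre_ excludes exactly the inputs where the Pythons raise KeyError: an item without the key "type".
def Pre_combine_plate_contents (contents : List (List (String × String))) : Prop :=
  ∀ item ∈ contents, "type" ∈ item.map Prod.fst
instance (contents : List (List (String × String))) : Decidable (Pre_combine_plate_contents contents) := by
  unfold Pre_combine_plate_contents; infer_instance

def pvWitness_combine_plate_contents : (List (List (String × String))) :=
  [[("type", "bread_whole")], [("type", "meat_cooked")]]

-- On plates whose item types are distinct known ingredients including tomato_chopped together with
-- lettuce_chopped or meat_cooked but not a full burger, A returns "plate_clean" (its comparison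
-- literals list tomato before lettuce/meat, hence never equal a sorted list: dead branches), while
-- B returns the intended combination name such as "plate_tomato_lettuce".
def D_combine_plate_contents (contents : List (List (String × String))) : Prop :=
  let ts := contents.map (fun item => PySem.Dict.getD (PySem.Dict.mk item) "type" "")
  ts.Nodup ∧
  (∀ t ∈ ts, t ∈ ["bread_whole", "tomato_chopped", "lettuce_chopped", "meat_cooked"]) ∧
  "tomato_chopped" ∈ ts ∧ ("lettuce_chopped" ∈ ts ∨ "meat_cooked" ∈ ts) ∧
  ¬("bread_whole" ∈ ts ∧ "lettuce_chopped" ∈ ts ∧ "meat_cooked" ∈ ts)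
instance (contents : List (List (String × String))) : Decidable (D_combine_plate_contents contents) := by
  unfold D_combine_plate_contents; infer_instance

def Spec_combine_plate_contents (contents : List (List (String × String))) (out : String) : Prop :=
  ¬ D_combine_plate_contents contents → out = combine_plate_contents_alt contents
instance (contents : List (List (String × String))) (out : String) : Decidable (Spec_combine_plate_contents contents out) := by
  unfold Spec_combine_plate_contents; infer_instance

def pvDiffWitness_combine_plate_contents : (List (List (String × String))) :=
  [[("type", "tomato_chopped")], [("type", "lettuce_chopped")]]
def pvDiffWitnessOut_combine_plate_contents : String × String := ("plate_clean", "plate_tomato_lettuce")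

-- ===== CLAIM (what is proved, stated in full; the proofs are below) =====
def Claim_unchanged_combine_plate_contents : Prop := ∀ (contents : List (List (String × String))), Dom_combine_plate_contents contents → Pre_combine_plate_contents contents → Spec_combine_plate_contents contents (combine_plate_contents contents)
def Claim_changed_combine_plate_contents : Prop := Dom_combine_plate_contents (pvDiffWitness_combine_plate_contents) ∧ Pre_combine_plate_contents (pvDiffWitness_combine_plate_contents) ∧ D_combine_plate_contents (pvDiffWitness_combine_plate_contents) ∧ combine_plate_contents (pvDiffWitness_combine_plate_contents) = pvDiffWitnessOut_combine_plate_contents.1 ∧ combine_plate_contents_alt (pvDiffWitness_combine_plate_contents) = pvDiffWitnessOut_combine_plate_contents.2 ∧ pvDiffWitnessOut_combine_plate_contents.1 ≠ pvDiffWitnessOut_combine_plate_contents.2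
def Claim_exact_combine_plate_contents : Prop := ∀ (contents : List (List (String × String))), Dom_combine_plate_contents contents → Pre_combine_plate_contents contents → D_combine_plate_contents contents → combine_plate_contents contents ≠ combine_plate_contents_alt contents

-- ===== LEMMAS AND PROOFS =====

-- the four known ingredient types, and A's branching on the sorted type list / B's body as
-- functions of the raw type list (definitionally equal to the ports)
def pvK : List String := ["bread_whole", "tomato_chopped", "lettuce_chopped", "meat_cooked"]

def pvAChain (types : List String) : String :=
  if ["bread_whole", "tomato_chopped", "lettuce_chopped", "meat_cooked"].all
      (fun x => types.contains x) then "plate_burger"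
  else if types = ["bread_whole", "lettuce_chopped", "meat_cooked"] then "plate_bread_lettuce_meat"
  else if types = ["bread_whole", "tomato_chopped", "lettuce_chopped"] then "plate_bread_tomato_lettuce"
  else if types = ["bread_whole", "tomato_chopped", "meat_cooked"] then "plate_bread_tomato_meat"
  else if types = ["tomato_chopped", "lettuce_chopped", "meat_cooked"] then "plate_tomato_lettuce_meat"
  else if types = ["bread_whole", "tomato_chopped"] then "plate_bread_tomato"
  else if types = ["bread_whole", "lettuce_chopped"] then "plate_bread_lettuce"
  else if types = ["bread_whole", "meat_cooked"] then "plate_bread_meat"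
  else if types = ["tomato_chopped", "lettuce_chopped"] then "plate_tomato_lettuce"
  else if types = ["tomato_chopped", "meat_cooked"] then "plate_tomato_meat"
  else if types = ["lettuce_chopped", "meat_cooked"] then "plate_lettuce_meat"
  else if types = ["bread_whole"] then "plate_bread"
  else if types = ["tomato_chopped"] then "plate_tomato"
  else if types = ["lettuce_chopped"] then "plate_lettuce"
  else if types = ["meat_cooked"] then "plate_meat"
  else "plate_clean"

def pvDts (ts : List String) : Prop :=
  ts.Nodup ∧ (∀ t ∈ ts, t ∈ pvK) ∧
  "tomato_chopped" ∈ ts ∧ ("lettuce_chopped" ∈ ts ∨ "meat_cooked" ∈ ts) ∧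
  ¬("bread_whole" ∈ ts ∧ "lettuce_chopped" ∈ ts ∧ "meat_cooked" ∈ ts)

lemma pv_A_eq (contents : List (List (String × String))) :
    combine_plate_contents contents
      = pvAChain (PySem.List.sorted (contents.map pvTypeOf) (fun x => x) false) := rfl

lemma pv_B_eq (contents : List (List (String × String))) :
    combine_plate_contents_alt contents = pvBBody (contents.map pvTypeOf) := rfl

lemma pv_D_iff (contents : List (List (String × String))) :
    D_combine_plate_contents contents ↔ pvDts (contents.map pvTypeOf) := Iff.rfl

lemma pv_foldl_add_sublist {a : Type} [BEq a] (xs acc : List a) :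
    (List.foldl PySem.Set.add acc xs).Sublist (acc ++ xs) := by
  induction xs generalizing acc with
  | nil => simp
  | cons x xs ih =>
    apply (ih (PySem.Set.add acc x)).trans
    by_cases hc : PySem.Set.contains acc x = true
    · simp only [PySem.Set.add, hc, if_true]
      exact List.Sublist.append_left (xs.sublist_cons_self x) acc
    · simp only [PySem.Set.add, hc]
      simp

lemma pv_nodup_of_ofList_length {a : Type} [BEq a] [LawfulBEq a] (xs : List a)
    (h : (PySem.Set.ofList xs).length = xs.length) : xs.Nodup := by
  have hs : (PySem.Set.ofList xs).Sublist xs := by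
    simpa [PySem.Set.ofList, PySem.Set.empty] using pv_foldl_add_sublist xs []
  have he : PySem.Set.ofList xs = xs := hs.eq_of_length h
  simpa [he] using PySem.Set.nodup_ofList xs

lemma pv_not_lit (ts L : List String) (hLne : L ≠ []) (hLnd : L.Nodup)
    (hLk : ∀ x ∈ L, x ∈ pvK)
    (hbad : ts = [] ∨ ¬ts.Nodup ∨ ∃ t ∈ ts, t ∉ pvK) :
    PySem.List.sorted ts (fun x => x) false ≠ L := by
  intro h
  have hp : ts.Perm L := (h ▸ PySem.List.sorted_perm ts (fun x => x) false).symm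
  rcases hbad with h1 | h1 | ⟨t, ht, htk⟩
  · subst h1; exact hLne hp.symm.eq_nil
  · exact h1 (hp.nodup_iff.mpr hLnd)
  · exact htk (hLk t (hp.mem_iff.mp ht))

lemma pv_perm_filter (ts : List String) (hnd : ts.Nodup) (hk : ∀ t ∈ ts, t ∈ pvK) :
    ts.Perm (pvK.filter (fun x => decide (x ∈ ts))) := by
  refine (List.perm_ext_iff_of_nodup hnd (List.Nodup.filter _ (by decide))).mpr ?_
  intro a
  simp only [List.mem_filter, decide_eq_true_eq]
  exact ⟨fun ha => ⟨hk a ha, ha⟩, fun h => h.2⟩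

lemma pv_bad_A (ts : List String)
    (hall : ¬("bread_whole" ∈ ts ∧ "tomato_chopped" ∈ ts ∧ "lettuce_chopped" ∈ ts ∧ "meat_cooked" ∈ ts))
    (hbad : ts = [] ∨ ¬ts.Nodup ∨ ∃ t ∈ ts, t ∉ pvK) :
    pvAChain (PySem.List.sorted ts (fun x => x) false) = "plate_clean" := by
  have key : ∀ L : List String, L ≠ [] → L.Nodup → (∀ x ∈ L, x ∈ pvK) →
      PySem.List.sorted ts (fun x => x) false ≠ L := fun L h1 h2 h3 => pv_not_lit ts L h1 h2 h3 hbad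
  have hg0 : (["bread_whole", "tomato_chopped", "lettuce_chopped", "meat_cooked"].all
      (fun x => (PySem.List.sorted ts (fun x => x) false).contains x)) = false := by
    rw [Bool.eq_false_iff]
    intro hc
    simp only [List.all_cons, List.all_nil, Bool.and_true, Bool.and_eq_true,
      List.contains_iff_mem, PySem.List.mem_sorted] at hc
    exact hall ⟨hc.1, hc.2.1, hc.2.2.1, hc.2.2.2⟩
  unfold pvAChain
  rw [if_neg (by rw [hg0]; simp),
    if_neg (key ["bread_whole", "lettuce_chopped", "meat_cooked"] (by decide) (by decide) (by decide)),
    if_neg (key ["bread_whole", "tomato_chopped", "lettuce_chopped"] (by decide) (by decide) (by decide)),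
    if_neg (key ["bread_whole", "tomato_chopped", "meat_cooked"] (by decide) (by decide) (by decide)),
    if_neg (key ["tomato_chopped", "lettuce_chopped", "meat_cooked"] (by decide) (by decide) (by decide)),
    if_neg (key ["bread_whole", "tomato_chopped"] (by decide) (by decide) (by decide)),
    if_neg (key ["bread_whole", "lettuce_chopped"] (by decide) (by decide) (by decide)),
    if_neg (key ["bread_whole", "meat_cooked"] (by decide) (by decide) (by decide)),
    if_neg (key ["tomato_chopped", "lettuce_chopped"] (by decide) (by decide) (by decide)),
    if_neg (key ["tomato_chopped", "meat_cooked"] (by decide) (by decide) (by decide)),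
    if_neg (key ["lettuce_chopped", "meat_cooked"] (by decide) (by decide) (by decide)),
    if_neg (key ["bread_whole"] (by decide) (by decide) (by decide)),
    if_neg (key ["tomato_chopped"] (by decide) (by decide) (by decide)),
    if_neg (key ["lettuce_chopped"] (by decide) (by decide) (by decide)),
    if_neg (key ["meat_cooked"] (by decide) (by decide) (by decide))]

lemma pv_bad_B (ts : List String)
    (hall : ¬("bread_whole" ∈ ts ∧ "tomato_chopped" ∈ ts ∧ "lettuce_chopped" ∈ ts ∧ "meat_cooked" ∈ ts))
    (hbad : ts = [] ∨ ¬ts.Nodup ∨ ∃ t ∈ ts, t ∉ pvK) :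
    pvBBody ts = "plate_clean" := by
  have hg1 : (pvCANON.all fun p => PySem.Set.contains (PySem.Set.ofList ts) p.1) = false := by
    simp only [pvCANON, List.all_cons, List.all_nil, Bool.and_true, PySem.Set.contains,
      List.contains_iff_mem]
    by_contra hc
    rw [Bool.not_eq_false, Bool.and_eq_true, Bool.and_eq_true, Bool.and_eq_true] at hc
    exact hall ⟨(PySem.Set.mem_ofList ts _).mp (by simpa using hc.1),
      (PySem.Set.mem_ofList ts _).mp (by simpa using hc.2.1),
      (PySem.Set.mem_ofList ts _).mp (by simpa using hc.2.2.1),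
      (PySem.Set.mem_ofList ts _).mp (by simpa using hc.2.2.2)⟩
  have hg2 : ts = [] ∨ ((ts.length : Int) ≠ PySem.Set.len (PySem.Set.ofList ts)
      ∨ (PySem.Set.ofList ts).any (fun t => !((pvCANON.map Prod.fst).contains t)) = true) := by
    rcases hbad with h1 | h1 | ⟨t, ht, htk⟩
    · exact Or.inl h1
    · refine Or.inr (Or.inl ?_)
      intro hlen
      exact h1 (pv_nodup_of_ofList_length ts (by simpa [PySem.Set.len] using hlen.symm))
    · refine Or.inr (Or.inr ?_)
      rw [List.any_eq_true]
      refine ⟨t, (PySem.Set.mem_ofList ts t).mpr ht, ?_⟩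
      rw [Bool.not_eq_eq_eq_not, Bool.not_true, Bool.eq_false_iff]
      intro hc
      exact htk (by simpa [pvCANON, pvK] using List.contains_iff_mem.mp hc)
  simp only [pvBBody]
  rw [if_neg (by rw [hg1]; simp)]
  rw [if_pos (by simpa using hg2)]

lemma pv_contains_decide (ts : List String) (x : String) :
    PySem.Set.contains ts x = decide (x ∈ ts) := by
  by_cases h : x ∈ ts <;> simp [PySem.Set.contains, List.contains_iff_mem, h]

lemma pv_allout (ts : List String) (hk : ∀ t ∈ ts, t ∈ pvK)
    (hB : "bread_whole" ∉ ts) (hT : "tomato_chopped" ∉ ts)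
    (hL : "lettuce_chopped" ∉ ts) (hM : "meat_cooked" ∉ ts) : ts = [] := by
  rcases ts with _ | ⟨a, tl⟩
  · rfl
  · exfalso
    have hka := hk a (List.mem_cons_self)
    simp only [pvK, List.mem_cons, List.not_mem_nil, or_false] at hka
    rcases hka with rfl | rfl | rfl | rfl
    · exact hB (List.mem_cons_self)
    · exact hT (List.mem_cons_self)
    · exact hL (List.mem_cons_self)
    · exact hM (List.mem_cons_self)

lemma pv_main (ts : List String) (hD : ¬ pvDts ts) :
    pvAChain (PySem.List.sorted ts (fun x => x) false) = pvBBody ts := by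
  by_cases hall : "bread_whole" ∈ ts ∧ "tomato_chopped" ∈ ts ∧ "lettuce_chopped" ∈ ts ∧
      "meat_cooked" ∈ ts
  · obtain ⟨hB, hT, hL, hM⟩ := hall
    have hcA : (["bread_whole", "tomato_chopped", "lettuce_chopped", "meat_cooked"].all
        (fun x => (PySem.List.sorted ts (fun x => x) false).contains x)) = true := by
      simp [List.contains_iff_mem, PySem.List.mem_sorted, hB, hT, hL, hM]
    have hcB : (pvCANON.all fun p => PySem.Set.contains (PySem.Set.ofList ts) p.1) = true := by
      simp [pvCANON, pv_contains_decide, PySem.Set.mem_ofList, hB, hT, hL, hM]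
    unfold pvAChain
    rw [if_pos hcA]
    simp only [pvBBody]
    rw [if_pos hcB]
  · by_cases hok : ts.Nodup ∧ ∀ t ∈ ts, t ∈ pvK
    · obtain ⟨hnd, hk⟩ := hok
      by_cases hB : "bread_whole" ∈ ts <;> by_cases hT : "tomato_chopped" ∈ ts <;>
        by_cases hL : "lettuce_chopped" ∈ ts <;> by_cases hM : "meat_cooked" ∈ ts
      all_goals first
        | (refine absurd ⟨?_, ?_, ?_, ?_⟩ hall <;> assumption)
        | (refine absurd ?_ hD
           unfold pvDts
           refine ⟨?_, ?_, ?_, ?_, ?_⟩ <;> first | assumption | tauto)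
        | (have hperm := pv_perm_filter ts hnd hk
           have hne : ts ≠ [] := by
             first | exact List.ne_nil_of_mem hB | exact List.ne_nil_of_mem hT
                   | exact List.ne_nil_of_mem hL | exact List.ne_nil_of_mem hM
           have hany : (ts.any fun t => !((pvCANON.map Prod.fst).contains t)) = false := by
             rw [List.any_eq_false]
             intro t ht
             have hkt := hk t ht
             simp only [pvK, List.mem_cons, List.not_mem_nil, or_false] at hkt
             simp [pvCANON, List.contains_iff_mem]
             tauto
           rw [PySem.List.sorted_eq_sorted_of_perm ts _ (fun x => x) (fun a b h => h) hperm]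
           simp only [pvBBody]
           rw [PySem.Set.ofList_eq_self_of_nodup ts hnd]
           simp only [hany]
           unfold pvAChain
           simp [pvK, pvCANON, List.filter, pv_contains_decide, hB, hT, hL, hM, hne,
             PySem.Set.len, PySem.List.sorted, PySem.List.insertBy, PySem.Str.join,
             PySem.Chars.join, List.contains_iff_mem]
           all_goals decide)
        | (rw [pv_allout ts hk hB hT hL hM]; decide)
    · have hbad : ts = [] ∨ ¬ts.Nodup ∨ ∃ t ∈ ts, t ∉ pvK := by
        by_cases hnd : ts.Nodup
        · refine Or.inr (Or.inr ?_)
          by_contra hc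
          push_neg at hc
          exact hok ⟨hnd, hc⟩
        · exact Or.inr (Or.inl hnd)
      rw [pv_bad_A ts hall hbad, pv_bad_B ts hall hbad]

lemma pv_tight (ts : List String) (hD : pvDts ts) :
    pvAChain (PySem.List.sorted ts (fun x => x) false) = "plate_clean" ∧
      pvBBody ts ≠ "plate_clean" := by
  obtain ⟨hnd, hk, hT, hLM, hnb⟩ := hD
  by_cases hB : "bread_whole" ∈ ts <;> by_cases hL : "lettuce_chopped" ∈ ts <;>
    by_cases hM : "meat_cooked" ∈ ts
  all_goals first
    | (exfalso; tauto)
    | (have hperm := pv_perm_filter ts hnd hk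
       have hne : ts ≠ [] := List.ne_nil_of_mem hT
       have hany : (ts.any fun t => !((pvCANON.map Prod.fst).contains t)) = false := by
         rw [List.any_eq_false]
         intro t ht
         have hkt := hk t ht
         simp only [pvK, List.mem_cons, List.not_mem_nil, or_false] at hkt
         simp [pvCANON, List.contains_iff_mem]
         tauto
       rw [PySem.List.sorted_eq_sorted_of_perm ts _ (fun x => x) (fun a b h => h) hperm]
       simp only [pvBBody]
       rw [PySem.Set.ofList_eq_self_of_nodup ts hnd]
       simp only [hany]
       unfold pvAChain
       refine ⟨?_, ?_⟩ <;>
         try simp [pvK, pvCANON, List.filter, pv_contains_decide, hB, hT, hL, hM, hne,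
           PySem.Set.len, PySem.List.sorted, PySem.List.insertBy, PySem.Str.join,
           PySem.Chars.join, List.contains_iff_mem]
       all_goals decide)

-- ===== VERDICT (by name: the statement is the Claim_ definition above) =====
theorem combine_plate_contents_spec : Claim_unchanged_combine_plate_contents := by
  intro contents _ _ hD
  rw [pv_A_eq, pv_B_eq]
  exact pv_main _ (fun h => hD ((pv_D_iff contents).mpr h))

theorem combine_plate_contents_changed : Claim_changed_combine_plate_contents := by
  unfold Claim_changed_combine_plate_contents
  refine ⟨by decide, by decide, by decide, ?_, ?_, by decide⟩
  · rw [pv_A_eq]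
    have hs : PySem.List.sorted (pvDiffWitness_combine_plate_contents.map pvTypeOf)
        (fun x => x) false = ["lettuce_chopped", "tomato_chopped"] := by
      simp [pvDiffWitness_combine_plate_contents, pvTypeOf, PySem.List.sorted,
        PySem.List.insertBy, PySem.Dict.getD, PySem.Dict.get?]
      decide
    rw [hs]
    decide
  · rw [pv_B_eq]
    show pvBBody ["tomato_chopped", "lettuce_chopped"] = _
    simp [pvBBody, pvCANON, PySem.Set.ofList, PySem.Set.add, PySem.Set.empty, PySem.Set.contains,
      PySem.Set.len, PySem.Str.join, PySem.Chars.join]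
    decide

theorem combine_plate_contents_tight : Claim_exact_combine_plate_contents := by
  intro contents _ _ hD
  rw [pv_A_eq, pv_B_eq]
  have h := pv_tight _ ((pv_D_iff contents).mp hD)
  rw [h.1]
  exact fun hc => h.2 hc.symm
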